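-- pv_equiv track=rewrite | github.com/hsun3163/xqtl-protocol | code/snakemake_pipeline/route3/transform_notebooks.py | src_to_list
-- ===== SOURCE A (Python) =====
-- def src_to_list(text):
--     """Convert a multiline string to a JSON notebook source list."""
--     lines = text.split("\n")
--     result = []
--     for i, line in enumerate(lines):
--         if i < len(lines) - 1:
--             result.append(line + "\n")
--         elif line:
--             result.append(line)
--     return result
-- ===== SOURCE B (Python) =====
-- def src_to_list(text):
--     """Convert a multiline string to a JSON notebook source list."""
--     result = []
--     cur = []
--     for ch in text:
--         cur.append(ch)
--         if ch == "\n":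
--             result.append("".join(cur))
--             cur = []
--     if cur:
--         result.append("".join(cur))
--     return result
-- ===== Notes on version B (the rewrite author's own statement) =====
-- stated objective: alternative
-- what changed: Replaces split-on-newline followed by an index-guarded enumerate loop with a single character scan that emits each chunk when it reaches a newline character and appends a trailing non-empty chunk at the end.
import Mathlib
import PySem

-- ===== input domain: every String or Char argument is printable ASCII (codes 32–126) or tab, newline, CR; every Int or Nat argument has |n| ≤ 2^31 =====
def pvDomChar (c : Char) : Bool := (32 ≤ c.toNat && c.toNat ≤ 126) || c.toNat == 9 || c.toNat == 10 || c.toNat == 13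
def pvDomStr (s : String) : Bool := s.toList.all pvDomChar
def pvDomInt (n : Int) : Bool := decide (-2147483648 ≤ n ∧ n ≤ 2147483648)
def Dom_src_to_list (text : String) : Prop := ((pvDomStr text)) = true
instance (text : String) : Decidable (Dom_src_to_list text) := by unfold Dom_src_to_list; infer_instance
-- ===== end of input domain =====

-- B replaces split('\n') + index-guarded loop with a single character scan; return value only, no side effects.

-- ===== PORT A =====
def src_to_list (text : String) : List String :=
  -- text.split("\n"): the separator is the nonempty literal "\n", so Python's split never
  -- raises; PySem.Chars.splitOn is exactly the sep ≠ "" form of str.split.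
  let lines : List String := (PySem.Chars.splitOn text.toList ['\n']).map String.ofList
  (PySem.List.enumerate lines).foldl
    (fun result p =>
      if p.1 < (lines.length : Int) - 1 then result ++ [p.2 ++ "\n"]
      else if p.2 ≠ "" then result ++ [p.2]
      else result) []

-- ===== PORT B =====
-- the for-loop of Source B: state (result, cur), scanning the remaining characters;
-- "".join(cur) is ported as String.ofList cur.
def srcScan : List String → List Char → List Char → List String
  | result, cur, [] => if cur = [] then result else result ++ [String.ofList cur]
  | result, cur, c :: cs =>
      if c = '\n' then srcScan (result ++ [String.ofList (cur ++ [c])]) [] cs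
      else srcScan result (cur ++ [c]) cs

def src_to_list_alt (text : String) : List String :=
  srcScan [] [] text.toList

-- ===== PRECONDITION & SPEC =====
def Spec_src_to_list (text : String) (out : List String) : Prop := out = src_to_list_alt text
instance (text : String) (out : List String) : Decidable (Spec_src_to_list text out) := by unfold Spec_src_to_list; infer_instance

-- ===== CLAIM (what is proved, stated in full; the proofs are below) =====
def Claim_equal_src_to_list : Prop := ∀ (text : String), Dom_src_to_list text → Spec_src_to_list text (src_to_list text)

-- ===== LEMMAS AND PROOFS =====

-- str.split("\n") as a plain structural recursion (cur kept in order)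
def splitAux : List Char → List Char → List (List Char)
  | [], cur => [cur]
  | c :: rest, cur => if c = '\n' then cur :: splitAux rest [] else splitAux rest (cur ++ [c])

-- the common shape of both results: every piece but the last gets "\n", an empty last piece is dropped
def fJoinS : List (List Char) → List String
  | [] => []
  | [l] => if l = [] then [] else [String.ofList l]
  | l :: rest => String.ofList (l ++ ['\n']) :: fJoinS rest

-- same, on the string side (A's loop produces this)
def fStr : List String → List String
  | [] => []
  | [x] => if x = "" then [] else [x]
  | x :: rest => (x ++ "\n") :: fStr rest

lemma splitAux_ne_nil (cs cur : List Char) : splitAux cs cur ≠ [] := by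
  induction cs generalizing cur with
  | nil => simp [splitAux]
  | cons c rest ih => by_cases h : c = '\n' <;> simp [splitAux, h, ih]

lemma splitOn_go_eq (fuel : Nat) (l cur : List Char) (acc : List (List Char))
    (h : l.length < fuel) :
    PySem.Chars.splitOn.go ['\n'] fuel l cur acc = acc.reverse ++ splitAux l cur.reverse := by
  induction fuel generalizing l cur acc with
  | zero => omega
  | succ fuel ih =>
    cases l with
    | nil => simp [PySem.Chars.splitOn.go, splitAux]
    | cons c rest =>
      by_cases hc : c = '\n'
      · have : PySem.Chars.splitOn.go ['\n'] (fuel+1) (c::rest) cur acc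
            = PySem.Chars.splitOn.go ['\n'] fuel rest [] (cur.reverse :: acc) := by
          simp [PySem.Chars.splitOn.go, List.isPrefixOf, hc]
        rw [this, ih rest [] (cur.reverse :: acc) (by simpa using Nat.lt_of_succ_lt_succ h)]
        simp [splitAux, hc]
      · have : PySem.Chars.splitOn.go ['\n'] (fuel+1) (c::rest) cur acc
            = PySem.Chars.splitOn.go ['\n'] fuel rest (c :: cur) acc := by
          simp [PySem.Chars.splitOn.go, List.isPrefixOf, Ne.symm hc]
        rw [this, ih rest (c :: cur) acc (by simpa using Nat.lt_of_succ_lt_succ h)]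
        simp [splitAux, hc]

lemma splitOn_eq_splitAux (l : List Char) :
    PySem.Chars.splitOn l ['\n'] = splitAux l [] := by
  have := splitOn_go_eq (l.length + 1) l [] [] (by omega)
  simpa [PySem.Chars.splitOn] using this

lemma srcScan_eq (cs : List Char) : ∀ (cur : List Char) (result : List String),
    srcScan result cur cs = result ++ fJoinS (splitAux cs cur) := by
  induction cs with
  | nil =>
    intro cur result
    by_cases h : cur = [] <;> simp [srcScan, splitAux, fJoinS, h]
  | cons c rest ih =>
    intro cur result
    by_cases hc : c = '\n'
    · obtain ⟨p, ps, hps⟩ : ∃ p ps, splitAux rest [] = p :: ps := by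
        cases h : splitAux rest ([] : List Char) with
        | nil => exact absurd h (splitAux_ne_nil rest [])
        | cons p ps => exact ⟨p, ps, rfl⟩
      simp [srcScan, splitAux, hc, ih, hps, fJoinS]
    · simp [srcScan, splitAux, hc, ih]

lemma fStr_map (ls : List (List Char)) : fStr (ls.map String.ofList) = fJoinS ls := by
  induction ls with
  | nil => simp [fStr, fJoinS]
  | cons l rest ih =>
    cases rest with
    | nil => simp [fStr, fJoinS]
    | cons y ys =>
      simp only [List.map_cons] at ih ⊢
      simp [fStr, fJoinS, ih]

lemma loopA_go (N : Int) (ls : List String) : ∀ (s : Int) (acc : List String),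
    s + ls.length = N →
    (PySem.List.enumerate ls s).foldl
      (fun result p =>
        if p.1 < N - 1 then result ++ [p.2 ++ "\n"]
        else if p.2 ≠ "" then result ++ [p.2]
        else result) acc = acc ++ fStr ls := by
  induction ls with
  | nil => intro s acc _; simp [PySem.List.enumerate_nil, fStr]
  | cons x xs ih =>
    intro s acc h
    rw [PySem.List.enumerate_cons]
    cases xs with
    | nil =>
      have hs : ¬ (s < N - 1) := by simp at h; omega
      simp only [List.foldl, PySem.List.enumerate_nil]
      by_cases hx : x = ""
      · simp [hs, hx, fStr]
      · simp [hs, hx, fStr]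
    | cons y ys =>
      have hs : s < N - 1 := by simp at h; omega
      have h' : (s + 1) + ((y :: ys).length : Int) = N := by simp at h ⊢; omega
      simp only [List.foldl, hs, if_pos]
      rw [ih (s + 1) (acc ++ [x ++ "\n"]) h']
      simp [fStr]

lemma src_to_list_eq_fJoinS (text : String) :
    src_to_list text = fJoinS (splitAux text.toList []) := by
  simp only [src_to_list]
  rw [splitOn_eq_splitAux]
  rw [loopA_go (((splitAux text.toList []).map String.ofList).length : Int)
        ((splitAux text.toList []).map String.ofList) 0 [] (by simp)]
  simp [fStr_map]

-- ===== VERDICT (by name: the statement is the Claim_ definition above) =====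
theorem src_to_list_spec : Claim_equal_src_to_list := by
  intro text _
  unfold Spec_src_to_list src_to_list_alt
  rw [src_to_list_eq_fJoinS, srcScan_eq]
  simp
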